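-- pv_equiv track=rewrite | github.com/Hritika10/-6Companies30Days | week 2.py | countIncremovableSubarrays
-- ===== SOURCE A (Python) =====
-- def countIncremovableSubarrays(nums):
--     n = len(nums)
--     count = 0
--     dp = [0] * n  # dp[i] represents the number of incremovable subarrays ending at index i
--
--     for i in range(1, n):
--         if nums[i] > nums[i - 1]:
--             dp[i] = dp[i - 1] + 1
--             count += dp[i]
--
--     return count
-- ===== SOURCE B (Python) =====
-- def countIncremovableSubarrays(nums):
--     # Divide and conquer: solve(lo, hi) returns (count, pref, suff) for nums[lo:hi],
--     # where count = number of strictly increasing subarrays of length >= 2,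
--     # pref/suff = lengths of the maximal increasing prefix/suffix runs.
--     # Crossing subarrays are exactly (left suffix run) x (right prefix run) pairs.
--     def solve(lo, hi):
--         m = hi - lo
--         if m <= 1:
--             return 0, m, m
--         mid = (lo + hi) // 2
--         cL, pL, sL = solve(lo, mid)
--         cR, pR, sR = solve(mid, hi)
--         c = cL + cR
--         pref, suff = pL, sR
--         if nums[mid] > nums[mid - 1]:
--             c += sL * pR
--             if pL == mid - lo:
--                 pref = pL + pR
--             if sR == hi - mid:
--                 suff = sL + sR
--         return c, pref, suff
--     return solve(0, len(nums))[0]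
-- ===== Notes on version B (the rewrite author's own statement) =====
-- stated objective: alternative
-- what changed: Replaces A's left-to-right dp scan (a per-index counter array summed incrementally) with a divide-and-conquer recursion that combines half-segment answers, counting the subarrays that cross the midpoint in closed form as (left suffix run)*(right prefix run).
import Mathlib
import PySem

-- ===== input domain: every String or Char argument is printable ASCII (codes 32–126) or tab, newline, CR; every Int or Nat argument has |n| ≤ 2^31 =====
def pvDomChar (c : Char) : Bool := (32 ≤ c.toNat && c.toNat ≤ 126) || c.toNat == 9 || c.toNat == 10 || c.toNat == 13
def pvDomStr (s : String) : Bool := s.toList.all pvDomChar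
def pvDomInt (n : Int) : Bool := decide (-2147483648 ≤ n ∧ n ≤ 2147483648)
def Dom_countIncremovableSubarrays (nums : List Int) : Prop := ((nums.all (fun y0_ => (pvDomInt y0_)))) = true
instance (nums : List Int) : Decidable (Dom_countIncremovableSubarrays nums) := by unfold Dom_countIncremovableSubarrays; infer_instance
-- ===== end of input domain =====

-- B replaces A's left-to-right dp scan (a per-index counter array summed incrementally) with a
-- divide-and-conquer recursion combining half-segment answers, counting midpoint-crossing
-- subarrays in closed form; objective: alternative.

-- nums[i] > nums[i-1], the strict-increase test shared by both programs (indices always in range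
-- where the ports use it, so pyGetD is exact there).
def pvInc (nums : List Int) (i : Int) : Bool := PySem.List.pyGetD nums i 0 > PySem.List.pyGetD nums (i - 1) 0

-- ===== PORT A =====
-- Loop body of A: state is (dp, count); nums[i]/dp[i-1]/dp[i] are always in range in the loop,
-- so pyGetD/pySetD are exact here.
def pvStepA (nums : List Int) (st : List Int × Int) (i : Int) : List Int × Int :=
  if pvInc nums i then
    let v := PySem.List.pyGetD st.1 (i - 1) 0 + 1
    (PySem.List.pySetD st.1 i v, st.2 + v)
  else st

def countIncremovableSubarrays (nums : List Int) : Int :=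
  let n : Int := nums.length
  ((PySem.List.pyRange 1 n 1).foldl (pvStepA nums) (List.replicate nums.length 0, 0)).2

-- ===== PORT B =====
-- solve(lo, hi) of Source B: returns (count, pref, suff) for the segment nums[lo:hi].
def pvSolve (nums : List Int) (lo hi : Int) : Int × Int × Int :=
  if h : hi - lo ≤ 1 then (0, hi - lo, hi - lo)
  else
    let mid := PySem.Int.floordiv (lo + hi) 2
    have hmb : mid * 2 ≤ lo + hi ∧ lo + hi < (mid + 1) * 2 :=
      (PySem.Int.floordiv_eq_iff_of_pos (by norm_num)).mp rfl
    have hm : (mid - lo).toNat < (hi - lo).toNat := by omega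
    have hm' : (hi - mid).toNat < (hi - lo).toNat := by omega
    let L := pvSolve nums lo mid
    let R := pvSolve nums mid hi
    let c := L.1 + R.1
    if pvInc nums mid then
      (c + L.2.2 * R.2.1,
       if L.2.1 = mid - lo then L.2.1 + R.2.1 else L.2.1,
       if R.2.2 = hi - mid then L.2.2 + R.2.2 else R.2.2)
    else (c, L.2.1, R.2.2)
termination_by (hi - lo).toNat

def countIncremovableSubarrays_alt (nums : List Int) : Int :=
  (pvSolve nums 0 nums.length).1

-- ===== PRECONDITION & SPEC =====
def Spec_countIncremovableSubarrays (nums : List Int) (out : Int) : Prop := out = countIncremovableSubarrays_alt nums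
instance (nums : List Int) (out : Int) : Decidable (Spec_countIncremovableSubarrays nums out) := by unfold Spec_countIncremovableSubarrays; infer_instance

-- ===== CLAIM (what is proved, stated in full; the proofs are below) =====
def Claim_equal_countIncremovableSubarrays : Prop := ∀ (nums : List Int), Dom_countIncremovableSubarrays nums → Spec_countIncremovableSubarrays nums (countIncremovableSubarrays nums)

-- ===== LEMMAS AND PROOFS =====

-- Reference linear scan: state (count, run) with run = dp value of the last processed index.
def pvScanStep (nums : List Int) (st : Int × Int) (i : Int) : Int × Int :=
  if pvInc nums i then (st.1 + st.2 + 1, st.2 + 1) else (st.1, 0)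

def pvFresh (nums : List Int) (lo hi : Int) : Int × Int :=
  (PySem.List.pyRange (lo + 1) hi 1).foldl (pvScanStep nums) (0, 0)

def pvTW (nums : List Int) (lo hi : Int) : Nat :=
  ((PySem.List.pyRange (lo + 1) hi 1).takeWhile (pvInc nums)).length

lemma pvScanStep_pos (nums : List Int) {x : Int} (st : Int × Int) (h : pvInc nums x = true) :
    pvScanStep nums st x = (st.1 + st.2 + 1, st.2 + 1) := by simp [pvScanStep, h]

lemma pvScanStep_neg (nums : List Int) {x : Int} (st : Int × Int) (h : ¬ pvInc nums x = true) :
    pvScanStep nums st x = (st.1, 0) := by simp [pvScanStep, h]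

lemma pvTW_full_iff (p : Int → Bool) (xs : List Int) :
    (xs.takeWhile p).length = xs.length ↔ xs.all p := by
  induction xs with
  | nil => simp
  | cons x xs ih =>
    by_cases h : p x
    · simp [List.takeWhile_cons_of_pos h, h, ih]
    · rw [List.takeWhile_cons_of_neg (by simp [h])]
      simp only [List.length_nil, List.length_cons, List.all_cons]
      constructor
      · intro hc; omega
      · intro hc
        rw [Bool.not_eq_true] at h
        rw [h] at hc
        simp at hc
  
lemma pvTW_append (p : Int → Bool) (xs ys : List Int) :
    ((xs ++ ys).takeWhile p).length =
      if (xs.takeWhile p).length = xs.length then xs.length + (ys.takeWhile p).length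
      else (xs.takeWhile p).length := by
  induction xs with
  | nil => simp
  | cons x xs ih =>
    by_cases h : p x
    · rw [List.cons_append, List.takeWhile_cons_of_pos h, List.takeWhile_cons_of_pos h,
        List.length_cons, List.length_cons, List.length_cons, ih]
      split_ifs with h1 h2 h3 <;> omega
    · rw [List.cons_append, List.takeWhile_cons_of_neg (by simp [h]),
        List.takeWhile_cons_of_neg (by simp [h]), List.length_nil, List.length_cons,
        if_neg (by omega)]

-- First component of a scan started at (c, r), in terms of the fresh scan from (0, 0).
lemma pvScan_fst (nums : List Int) (xs : List Int) : ∀ c r : Int,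
    (xs.foldl (pvScanStep nums) (c, r)).1
      = c + (xs.foldl (pvScanStep nums) (0, 0)).1
          + r * ((xs.takeWhile (pvInc nums)).length : Int) := by
  induction xs with
  | nil => intro c r; simp
  | cons x xs ih =>
    intro c r
    by_cases h : pvInc nums x
    · rw [List.foldl_cons, List.foldl_cons, pvScanStep_pos nums _ h, pvScanStep_pos nums _ h,
        List.takeWhile_cons_of_pos h, List.length_cons]
      dsimp only
      rw [ih (c + r + 1) (r + 1), ih (0 + 0 + 1) (0 + 1)]
      push_cast; ring
    · rw [List.foldl_cons, List.foldl_cons, pvScanStep_neg nums _ h, pvScanStep_neg nums _ h,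
        List.takeWhile_cons_of_neg (by simpa using h), List.length_nil]
      dsimp only
      rw [ih c 0, ih 0 0]
      ring

-- Second component (the running run length) of a shifted scan.
lemma pvScan_snd (nums : List Int) (xs : List Int) : ∀ c r : Int,
    (xs.foldl (pvScanStep nums) (c, r)).2
      = if (xs.takeWhile (pvInc nums)).length = xs.length
        then r + (xs.foldl (pvScanStep nums) (0, 0)).2
        else (xs.foldl (pvScanStep nums) (0, 0)).2 := by
  induction xs with
  | nil => intro c r; simp
  | cons x xs ih =>
    intro c r
    by_cases h : pvInc nums x
    · rw [List.foldl_cons, List.foldl_cons, pvScanStep_pos nums _ h, pvScanStep_pos nums _ h,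
        List.takeWhile_cons_of_pos h, List.length_cons, List.length_cons]
      dsimp only
      rw [ih (c + r + 1) (r + 1), ih (0 + 0 + 1) (0 + 1)]
      generalize (xs.foldl (pvScanStep nums) (0, 0)).2 = f2
      split_ifs <;> first | omega | exact (by assumption : False).elim
    · rw [List.foldl_cons, List.foldl_cons, pvScanStep_neg nums _ h, pvScanStep_neg nums _ h,
        List.takeWhile_cons_of_neg (by simpa using h), List.length_nil, List.length_cons]
      dsimp only
      rw [ih c 0, ih 0 0]
      generalize (xs.foldl (pvScanStep nums) (0, 0)).2 = f2
      split_ifs <;> first | omega | exact (by assumption : False).elim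

-- The run stays nonnegative.
lemma pvScan_run_nonneg (nums : List Int) (xs : List Int) : ∀ c r : Int, 0 ≤ r →
    0 ≤ (xs.foldl (pvScanStep nums) (c, r)).2 := by
  induction xs with
  | nil => intro c r hr; simpa
  | cons x xs ih =>
    intro c r hr
    by_cases h : pvInc nums x
    · rw [List.foldl_cons, pvScanStep_pos nums _ h]
      exact ih _ _ (by dsimp only; omega)
    · rw [List.foldl_cons, pvScanStep_neg nums _ h]
      exact ih _ _ le_rfl

-- The run reaches r + length exactly when every index passes the test.
lemma pvScan_run_le (nums : List Int) (xs : List Int) : ∀ c r : Int, 0 ≤ r →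
    (xs.foldl (pvScanStep nums) (c, r)).2 ≤ r + xs.length ∧
      ((xs.foldl (pvScanStep nums) (c, r)).2 = r + xs.length ↔ xs.all (pvInc nums)) := by
  induction xs with
  | nil => intro c r hr; simp
  | cons x xs ih =>
    intro c r hr
    by_cases h : pvInc nums x
    · rw [List.foldl_cons, pvScanStep_pos nums _ h, List.length_cons, List.all_cons, h]
      dsimp only
      obtain ⟨h1, h2⟩ := ih (c + r + 1) (r + 1) (by omega)
      constructor
      · push_cast; push_cast at h1; omega
      · simp only [Bool.true_and]
        rw [← h2]; push_cast; omega
    · rw [List.foldl_cons, pvScanStep_neg nums _ h, List.length_cons, List.all_cons,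
        Bool.not_eq_true _ |>.mp h]
      dsimp only
      obtain ⟨h1, _⟩ := ih c 0 le_rfl
      constructor
      · push_cast; push_cast at h1; omega
      · simp only [Bool.false_and, Bool.false_eq_true, iff_false]
        push_cast; push_cast at h1; omega

lemma pvFresh_run_nonneg (nums : List Int) (lo hi : Int) : 0 ≤ (pvFresh nums lo hi).2 :=
  pvScan_run_nonneg nums _ 0 0 le_rfl

-- Characterization of pvSolve by the reference linear scan.
lemma pvSolve_eq (nums : List Int) (n : Nat) :
    ∀ lo hi : Int, (hi - lo).toNat = n → lo ≤ hi →
      pvSolve nums lo hi =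
        ((pvFresh nums lo hi).1,
         if hi = lo then 0 else (pvTW nums lo hi : Int) + 1,
         if hi = lo then 0 else (pvFresh nums lo hi).2 + 1) := by
  induction n using Nat.strong_induction_on with
  | _ n ih =>
    intro lo hi hn hle
    rw [pvSolve]
    by_cases hbase : hi - lo ≤ 1
    · rw [dif_pos hbase]
      have hrange : PySem.List.pyRange (lo + 1) hi 1 = [] :=
        PySem.List.pyRange_one_eq_nil (by omega)
      by_cases h0 : hi = lo
      · simp [pvFresh, pvTW, hrange, h0]
      · have h1 : hi - lo = 1 := by omega
        simp [pvFresh, pvTW, hrange, h1, h0]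
    · rw [dif_neg hbase]
      simp only []
      set mid := PySem.Int.floordiv (lo + hi) 2 with hmid
      have hmb : mid * 2 ≤ lo + hi ∧ lo + hi < (mid + 1) * 2 :=
        (PySem.Int.floordiv_eq_iff_of_pos (by norm_num)).mp rfl
      have hlm : lo < mid := by omega
      have hmh : mid < hi := by omega
      -- induction hypotheses for the two halves
      have IHL := ih (mid - lo).toNat (by omega) lo mid rfl (by omega)
      have IHR := ih (hi - mid).toNat (by omega) mid hi rfl (by omega)
      rw [IHL, IHR]
      simp only [if_neg (show ¬ mid = lo by omega), if_neg (show ¬ hi = mid by omega),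
        if_neg (show ¬ hi = lo by omega)]
      -- split the index range of the whole segment at mid
      have hsplit : PySem.List.pyRange (lo + 1) hi 1 =
          PySem.List.pyRange (lo + 1) mid 1 ++ mid :: PySem.List.pyRange (mid + 1) hi 1 := by
        rw [PySem.List.pyRange_one_append (lo + 1) mid hi (by omega) (by omega),
            PySem.List.pyRange_one_cons hmh]
      set X := PySem.List.pyRange (lo + 1) mid 1 with hX
      set Y := PySem.List.pyRange (mid + 1) hi 1 with hY
      have hXlen : (X.length : Int) = mid - lo - 1 := by
        rw [hX, PySem.List.length_pyRange_one]; omega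
      have hYlen : (Y.length : Int) = hi - mid - 1 := by
        rw [hY, PySem.List.length_pyRange_one]; omega
      set FL := pvFresh nums lo mid with hFL
      set FR := pvFresh nums mid hi with hFR
      have hFLdef : FL = X.foldl (pvScanStep nums) (0, 0) := rfl
      have hFRdef : FR = Y.foldl (pvScanStep nums) (0, 0) := rfl
      set tX := pvTW nums lo mid with htX
      set tY := pvTW nums mid hi with htY
      have htXdef : tX = (X.takeWhile (pvInc nums)).length := rfl
      have htYdef : tY = (Y.takeWhile (pvInc nums)).length := rfl
      have hRnn : 0 ≤ FR.2 := pvFresh_run_nonneg nums mid hi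
      have hLnn : 0 ≤ FL.2 := pvFresh_run_nonneg nums lo mid
      -- run-fullness on the right half
      have hfullR : FR.2 = (Y.length : Int) ↔ tY = Y.length := by
        rw [hFRdef, htYdef, pvTW_full_iff]
        have := (pvScan_run_le nums Y 0 0 le_rfl).2
        constructor
        · intro h; exact this.mp (by omega)
        · intro h; have := this.mpr h; omega
      -- the whole fresh scan, split at mid
      have hfreshsplit : pvFresh nums lo hi = (mid :: Y).foldl (pvScanStep nums) FL := by
        rw [pvFresh, hsplit, List.foldl_append, ← hFLdef]
      by_cases hb : pvInc nums mid
      · rw [if_pos hb]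
        have hW : pvFresh nums lo hi = Y.foldl (pvScanStep nums) (FL.1 + FL.2 + 1, FL.2 + 1) := by
          rw [hfreshsplit, List.foldl_cons, pvScanStep_pos nums FL hb]
        have hW1 : (pvFresh nums lo hi).1 = FL.1 + FL.2 + 1 + FR.1 + (FL.2 + 1) * (tY : Int) := by
          rw [hW, pvScan_fst nums Y (FL.1 + FL.2 + 1) (FL.2 + 1), ← hFRdef, ← htYdef]
        have hW2 : (pvFresh nums lo hi).2
            = if tY = Y.length then FL.2 + 1 + FR.2 else FR.2 := by
          rw [hW, pvScan_snd nums Y (FL.1 + FL.2 + 1) (FL.2 + 1), ← hFRdef, ← htYdef]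
        have htw : (pvTW nums lo hi : Int)
            = if tX = X.length then (X.length : Int) + (tY : Int) + 1 else (tX : Int) := by
          unfold pvTW
          rw [hsplit, pvTW_append, List.takeWhile_cons_of_pos hb, List.length_cons,
            ← htXdef, ← htYdef]
          split_ifs <;> push_cast <;> ring
        refine Prod.ext ?_ (Prod.ext ?_ ?_)
        · dsimp only
          rw [hW1]; push_cast; ring
        · dsimp only
          rw [htw]
          by_cases hfull : tX = X.length
          · rw [if_pos (by omega), if_pos hfull]; omega
          · rw [if_neg (by omega), if_neg hfull]
        · dsimp only
          rw [hW2]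
          by_cases hfy : tY = Y.length
          · rw [if_pos (by rw [(hfullR.mpr hfy)] at *; omega), if_pos hfy]
            ring
          · have : ¬ FR.2 = (Y.length : Int) := fun hc => hfy (hfullR.mp hc)
            rw [if_neg (by omega), if_neg hfy]
      · rw [if_neg hb]
        have hW : pvFresh nums lo hi = Y.foldl (pvScanStep nums) (FL.1, 0) := by
          rw [hfreshsplit, List.foldl_cons, pvScanStep_neg nums FL hb]
        have hW1 : (pvFresh nums lo hi).1 = FL.1 + FR.1 := by
          rw [hW, pvScan_fst nums Y FL.1 0, ← hFRdef]; ring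
        have hW2 : (pvFresh nums lo hi).2 = FR.2 := by
          rw [hW, pvScan_snd nums Y FL.1 0, ← hFRdef]
          split_ifs <;> ring
        have htw : (pvTW nums lo hi : Int) = (tX : Int) := by
          unfold pvTW
          rw [hsplit, pvTW_append, List.takeWhile_cons_of_neg (by simpa using hb),
            List.length_nil, ← htXdef]
          split_ifs with hfull <;> push_cast [hfull] <;> ring
        refine Prod.ext ?_ (Prod.ext ?_ ?_)
        · dsimp only; rw [hW1]
        · dsimp only; rw [htw]
        · dsimp only; rw [hW2]

-- Invariant linking A's (dp, count) to the reference scan state (count, run).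
def pvInvA (nums : List Int) (k : Nat) (a : List Int × Int) (s : Int × Int) : Prop :=
  a.1.length = nums.length ∧
  (∀ j : Nat, k ≤ j → a.1.getD j 0 = 0) ∧
  a.1.getD (k - 1) 0 = s.2 ∧
  a.2 = s.1

lemma pvGetD_set_ne (xs : List Int) (m n : Nat) (v : Int) (h : m ≠ n) :
    (xs.set m v).getD n 0 = xs.getD n 0 := by
  simp [List.getD_eq_getElem?_getD, List.getElem?_set_ne h]

lemma pvGetD_set_self (xs : List Int) (m : Nat) (v : Int) (h : m < xs.length) :
    (xs.set m v).getD m 0 = v := by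
  rw [List.getD_eq_getElem _ _ (by simpa using h), List.getElem_set_self]

lemma pvInvA_holds (nums : List Int) (k : Nat) (h1 : 1 ≤ k) (hk : k ≤ nums.length) :
    pvInvA nums k
      ((PySem.List.pyRange 1 (k : Int) 1).foldl (pvStepA nums) (List.replicate nums.length 0, 0))
      ((PySem.List.pyRange 1 (k : Int) 1).foldl (pvScanStep nums) (0, 0)) := by
  induction k with
  | zero => omega
  | succ k ih =>
    by_cases hk1 : k = 0
    · subst hk1
      rw [show ((0 + 1 : Nat) : Int) = 1 by norm_num, PySem.List.pyRange_one_eq_nil (by omega)]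
      simp only [List.foldl_nil]
      exact ⟨by simp, fun j _ => by simp [List.getD], by simp [List.getD], rfl⟩
    · have hkk : 1 ≤ k := by omega
      obtain ⟨hlen, hzero, hprev, hct⟩ := ih hkk (by omega)
      have hsplit : PySem.List.pyRange 1 ((k + 1 : Nat) : Int) 1
          = PySem.List.pyRange 1 (k : Int) 1 ++ [(k : Int)] := by
        push_cast
        exact PySem.List.pyRange_one_succ_right (by exact_mod_cast hkk)
      rw [hsplit, List.foldl_append, List.foldl_append]
      set a := (PySem.List.pyRange 1 (k : Int) 1).foldl (pvStepA nums) (List.replicate nums.length 0, 0) with ha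
      set s := (PySem.List.pyRange 1 (k : Int) 1).foldl (pvScanStep nums) (0, 0) with hs
      have hkm1 : ((k : Int) - 1) = ((k - 1 : Nat) : Int) := by push_cast [hkk]; ring
      have hget : PySem.List.pyGetD a.1 ((k : Int) - 1) 0 = s.2 := by
        rw [hkm1, PySem.List.pyGetD_natCast]; exact hprev
      simp only [List.foldl_cons, List.foldl_nil]
      by_cases hc : pvInc nums (k : Int)
      · rw [pvScanStep_pos nums s hc]
        simp only [pvStepA, hc, if_pos, hget, PySem.List.pySetD_natCast]
        refine ⟨by simp [hlen], ?_, ?_, by dsimp only; omega⟩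
        · intro j hj
          rw [pvGetD_set_ne _ _ _ _ (by omega)]
          exact hzero j (by omega)
        · rw [Nat.add_sub_cancel, pvGetD_set_self _ _ _ (by omega)]
      · rw [pvScanStep_neg nums s hc]
        simp only [pvStepA, hc, Bool.false_eq_true, if_neg, not_false_iff]
        refine ⟨hlen, fun j hj => hzero j (by omega), ?_, hct⟩
        rw [Nat.add_sub_cancel]
        exact hzero k (le_refl k)

-- ===== VERDICT (by name: the statement is the Claim_ definition above) =====
theorem countIncremovableSubarrays_spec : Claim_equal_countIncremovableSubarrays := by
  intro nums _
  unfold Spec_countIncremovableSubarrays countIncremovableSubarrays countIncremovableSubarrays_alt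
  rw [pvSolve_eq nums ((nums.length : Int) - 0).toNat 0 (nums.length : Int) rfl (by positivity)]
  by_cases hn : nums.length = 0
  · rw [hn]
    norm_num [pvFresh, PySem.List.pyRange_one_eq_nil]
  · obtain ⟨_, _, _, hct⟩ := pvInvA_holds nums nums.length (by omega) le_rfl
    dsimp only
    rw [hct]
    norm_num [pvFresh]
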